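-- pv_equiv track=rewrite | github.com/pfehlinger/risk_adjustment_model | src/risk_adjustment_model/v07.py | _determine_severe_illness_transplant_status
-- ===== SOURCE A (Python) =====
-- from typing import List, Union, Type
--
-- def _determine_severe_illness_transplant_status(category_list: List[str]):
--     """
--     Determines the severe illness and transplant status of a beneficiary based on their diagnosis categories.
--
--     This function evaluates whether the beneficiary has a severe illness or has undergone a transplant by checking the presence of specific diagnosis categories in the category_list.
--
--     Args:
--         category_list (List[str]): A list of diagnosis categories associated with the beneficiary.
--
--     Returns:
--         tuple: A tuple containing two boolean values:
--             - severe_illness (bool): True if the beneficiary has a severe illness, otherwise False.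
--             - transplant (bool): True if the beneficiary has undergone a transplant, otherwise False.
--
--     Notes:
--         - The function checks for specific diagnosis categories to determine the severe illness and transplant status.
--         - Categories indicating severe illness include various HHS_HCC codes such as "HHS_HCC002", "HHS_HCC003", "HHS_HCC004", etc.
--         - Categories indicating transplant include various HHS_HCC codes such as "HHS_HCC018", "HHS_HCC034", "HHS_HCC041", etc.
--     """
--     severe_illness = any(
--         category in category_list
--         for category in [
--             "HHS_HCC002",
--             "HHS_HCC003",
--             "HHS_HCC004",
--             "HHS_HCC006",
--             "HHS_HCC018",
--             "HHS_HCC023",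
--             "HHS_HCC034",
--             "HHS_HCC041",
--             "HHS_HCC042",
--             "HHS_HCC096",
--             "HHS_HCC121",
--             "HHS_HCC122",
--             "HHS_HCC125",
--             # G13
--             "HHS_HCC126",
--             "HHS_HCC127",
--             # G14
--             "HHS_HCC128",
--             "HHS_HCC129",
--             ##
--             "HHS_HCC135",
--             "HHS_HCC145",
--             "HHS_HCC156",
--             "HHS_HCC158",
--             "HHS_HCC163",
--             "HHS_HCC183",
--             "HHS_HCC218",
--             "HHS_HCC223",
--             "HHS_HCC251",
--         ]
--     )
--     transplant = any(
--         category in category_list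
--         for category in [
--             "HHS_HCC018",
--             "HHS_HCC034",
--             "HHS_HCC041",
--             # G14
--             "HHS_HCC128",
--             "HHS_HCC129",
--             ##
--             "HHS_HCC158",
--             "HHS_HCC183",
--             "HHS_HCC251",
--         ]
--     )
--
--     return severe_illness, transplant
-- ===== SOURCE B (Python) =====
-- # One dict maps each flagged HCC code to whether it is also a transplant code
-- # (the transplant codes are a subset of the severe-illness codes).
-- _FLAGS = {
--     "HHS_HCC002": False, "HHS_HCC003": False, "HHS_HCC004": False,
--     "HHS_HCC006": False, "HHS_HCC018": True,  "HHS_HCC023": False,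
--     "HHS_HCC034": True,  "HHS_HCC041": True,  "HHS_HCC042": False,
--     "HHS_HCC096": False, "HHS_HCC121": False, "HHS_HCC122": False,
--     "HHS_HCC125": False, "HHS_HCC126": False, "HHS_HCC127": False,
--     "HHS_HCC128": True,  "HHS_HCC129": True,  "HHS_HCC135": False,
--     "HHS_HCC145": False, "HHS_HCC156": False, "HHS_HCC158": True,
--     "HHS_HCC163": False, "HHS_HCC183": True,  "HHS_HCC218": False,
--     "HHS_HCC223": False, "HHS_HCC251": True,
-- }
--
--
-- def _determine_severe_illness_transplant_status(category_list):
--     severe_illness = False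
--     transplant = False
--     for category in category_list:
--         tx = _FLAGS.get(category)
--         if tx is not None:
--             severe_illness = True
--             transplant = transplant or tx
--     return severe_illness, transplant
-- ===== Notes on version B (the rewrite author's own statement) =====
-- stated objective: faster
-- what changed: B replaces A's 34 whole-list membership scans (one per constant code) by a single pass over the input list with one dict mapping each flagged code to whether it is also a transplant code (the transplant codes are a subset of the severe codes), accumulating both flags at once.
import Mathlib
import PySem

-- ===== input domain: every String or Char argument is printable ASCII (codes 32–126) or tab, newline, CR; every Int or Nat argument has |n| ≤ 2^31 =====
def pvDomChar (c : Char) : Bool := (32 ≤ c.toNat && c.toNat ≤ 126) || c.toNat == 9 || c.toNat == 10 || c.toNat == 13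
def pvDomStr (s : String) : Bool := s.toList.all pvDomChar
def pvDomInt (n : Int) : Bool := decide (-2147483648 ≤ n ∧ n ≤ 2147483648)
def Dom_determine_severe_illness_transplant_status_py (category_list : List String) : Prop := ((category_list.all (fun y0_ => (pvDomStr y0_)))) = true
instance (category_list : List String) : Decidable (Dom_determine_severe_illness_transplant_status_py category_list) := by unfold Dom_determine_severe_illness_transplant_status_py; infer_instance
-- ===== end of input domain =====

-- B replaces A's 34 whole-list membership scans (one per constant code) by a single pass
-- over the input list with one dict mapping each flagged code to whether it is also a
-- transplant code; objective: faster (constant-factor mechanism; timing decides the label).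

-- ===== PORT A =====
-- the two constant code lists A's generator expressions iterate over, in source order
def pvSevereCodes : List String :=
  ["HHS_HCC002", "HHS_HCC003", "HHS_HCC004", "HHS_HCC006", "HHS_HCC018",
   "HHS_HCC023", "HHS_HCC034", "HHS_HCC041", "HHS_HCC042", "HHS_HCC096",
   "HHS_HCC121", "HHS_HCC122", "HHS_HCC125", "HHS_HCC126", "HHS_HCC127",
   "HHS_HCC128", "HHS_HCC129", "HHS_HCC135", "HHS_HCC145", "HHS_HCC156",
   "HHS_HCC158", "HHS_HCC163", "HHS_HCC183", "HHS_HCC218", "HHS_HCC223",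
   "HHS_HCC251"]

def pvTransplantCodes : List String :=
  ["HHS_HCC018", "HHS_HCC034", "HHS_HCC041", "HHS_HCC128", "HHS_HCC129",
   "HHS_HCC158", "HHS_HCC183", "HHS_HCC251"]

-- A: any(category in category_list for category in <codes>) for each of the two lists
def determine_severe_illness_transplant_status_py (category_list : List String) : Bool × Bool :=
  (pvSevereCodes.any (fun category => category_list.contains category),
   pvTransplantCodes.any (fun category => category_list.contains category))

-- ===== PORT B =====
-- the dict literal _FLAGS of Source B: flagged code ↦ is-it-also-a-transplant-code
def pvFLAGS : PySem.Dict String Bool := PySem.Dict.ofList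
  [("HHS_HCC002", false), ("HHS_HCC003", false), ("HHS_HCC004", false),
   ("HHS_HCC006", false), ("HHS_HCC018", true),  ("HHS_HCC023", false),
   ("HHS_HCC034", true),  ("HHS_HCC041", true),  ("HHS_HCC042", false),
   ("HHS_HCC096", false), ("HHS_HCC121", false), ("HHS_HCC122", false),
   ("HHS_HCC125", false), ("HHS_HCC126", false), ("HHS_HCC127", false),
   ("HHS_HCC128", true),  ("HHS_HCC129", true),  ("HHS_HCC135", false),
   ("HHS_HCC145", false), ("HHS_HCC156", false), ("HHS_HCC158", true),
   ("HHS_HCC163", false), ("HHS_HCC183", true),  ("HHS_HCC218", false),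
   ("HHS_HCC223", false), ("HHS_HCC251", true)]

-- the for-loop of Source B: one pass over category_list, dict lookup, two accumulating flags
def pvAltLoop : List String → Bool → Bool → Bool × Bool
  | [], severe_illness, transplant => (severe_illness, transplant)
  | category :: rest, severe_illness, transplant =>
    match pvFLAGS.get? category with
    | none => pvAltLoop rest severe_illness transplant
    | some tx => pvAltLoop rest true (transplant || tx)

def determine_severe_illness_transplant_status_py_alt (category_list : List String) : Bool × Bool :=
  pvAltLoop category_list false false

-- ===== PRECONDITION & SPEC =====
def Spec_determine_severe_illness_transplant_status_py (category_list : List String) (out : Bool × Bool) : Prop := out = determine_severe_illness_transplant_status_py_alt category_list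
instance (category_list : List String) (out : Bool × Bool) : Decidable (Spec_determine_severe_illness_transplant_status_py category_list out) := by unfold Spec_determine_severe_illness_transplant_status_py; infer_instance

-- ===== CLAIM (what is proved, stated in full; the proofs are below) =====
def Claim_equal_determine_severe_illness_transplant_status_py : Prop := ∀ (category_list : List String), Dom_determine_severe_illness_transplant_status_py category_list → Spec_determine_severe_illness_transplant_status_py category_list (determine_severe_illness_transplant_status_py category_list)

-- ===== LEMMAS AND PROOFS =====

def pvEntries : List (String × Bool) :=
  [("HHS_HCC002", false), ("HHS_HCC003", false), ("HHS_HCC004", false),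
   ("HHS_HCC006", false), ("HHS_HCC018", true),  ("HHS_HCC023", false),
   ("HHS_HCC034", true),  ("HHS_HCC041", true),  ("HHS_HCC042", false),
   ("HHS_HCC096", false), ("HHS_HCC121", false), ("HHS_HCC122", false),
   ("HHS_HCC125", false), ("HHS_HCC126", false), ("HHS_HCC127", false),
   ("HHS_HCC128", true),  ("HHS_HCC129", true),  ("HHS_HCC135", false),
   ("HHS_HCC145", false), ("HHS_HCC156", false), ("HHS_HCC158", true),
   ("HHS_HCC163", false), ("HHS_HCC183", true),  ("HHS_HCC218", false),
   ("HHS_HCC223", false), ("HHS_HCC251", true)]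

-- lookup in a literal dict with distinct keys: found iff the key is a key, and the
-- value records membership in the filtered key list
theorem pv_get_mk_char (l : List (String × Bool)) (hn : (l.map Prod.fst).Nodup) (x : String) :
    (PySem.Dict.mk l).get? x =
      (if x ∈ l.map Prod.fst
       then some (decide (x ∈ (l.filter (fun p => p.2)).map Prod.fst))
       else none) := by
  induction l with
  | nil => simp [PySem.Dict.get?]
  | cons p rest ih =>
    obtain ⟨k, v⟩ := p
    rw [List.map_cons, List.nodup_cons] at hn
    rw [PySem.Dict.get?_mk_cons, ih hn.2]
    by_cases hx : k = x
    · subst hx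
      have hnot : k ∉ rest.map Prod.fst := hn.1
      have hnotf : k ∉ (rest.filter (fun p => p.2)).map Prod.fst := by
        intro hmem
        obtain ⟨q, hq, hk⟩ := List.mem_map.mp hmem
        exact hnot (hk ▸ List.mem_map_of_mem (List.mem_of_mem_filter hq))
      cases v <;> simp [hnot, hnotf]
    · have hbeq : (k == x) = false := by simp [hx]
      have hxk : ¬ x = k := fun h => hx h.symm
      cases v <;> simp [hbeq, hxk]

-- the literal facts tying the dict to A's two constant lists
theorem pvFLAGS_mk : pvFLAGS = PySem.Dict.mk pvEntries := by decide
theorem pvEntries_nodup : (pvEntries.map Prod.fst).Nodup := by decide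
theorem pvEntries_keys : pvEntries.map Prod.fst = pvSevereCodes := by decide
theorem pvEntries_filter : (pvEntries.filter (fun p => p.2)).map Prod.fst = pvTransplantCodes := by
  decide

theorem pv_get_char (x : String) :
    pvFLAGS.get? x =
      (if x ∈ pvSevereCodes then some (decide (x ∈ pvTransplantCodes)) else none) := by
  rw [pvFLAGS_mk, pv_get_mk_char pvEntries pvEntries_nodup, pvEntries_keys, pvEntries_filter]

-- transplant codes are among the severe codes
theorem pv_sub (x : String) (h : x ∉ pvSevereCodes) : x ∉ pvTransplantCodes := by
  have hsub : ∀ y ∈ pvTransplantCodes, y ∈ pvSevereCodes := by decide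
  exact fun hx => h (hsub x hx)

-- the loop computes, in one pass, the two 'any' values over the input list
theorem pvAltLoop_eq (xs : List String) : ∀ (s t : Bool),
    pvAltLoop xs s t =
      (s || xs.any (fun x => decide (x ∈ pvSevereCodes)),
       t || xs.any (fun x => decide (x ∈ pvTransplantCodes))) := by
  induction xs with
  | nil => intro s t; simp [pvAltLoop]
  | cons x rest ih =>
    intro s t
    rw [show pvAltLoop (x :: rest) s t =
        (match pvFLAGS.get? x with
         | none => pvAltLoop rest s t
         | some tx => pvAltLoop rest true (t || tx)) from rfl, pv_get_char]
    by_cases hs : x ∈ pvSevereCodes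
    · rw [if_pos hs]
      show pvAltLoop rest true (t || decide (x ∈ pvTransplantCodes)) = _
      rw [ih]
      cases t <;> simp [hs]
    · have ht := pv_sub x hs
      rw [if_neg hs]
      show pvAltLoop rest s t = _
      rw [ih]
      simp [hs, ht]

-- scanning the constant list for members of cl equals scanning cl for the constants
theorem pv_any_swap (codes cl : List String) :
    codes.any (fun c => cl.contains c) = cl.any (fun x => codes.contains x) := by
  rw [Bool.eq_iff_iff]
  simp only [List.any_eq_true, List.contains_iff_mem]
  exact ⟨fun ⟨c, h1, h2⟩ => ⟨c, h2, h1⟩, fun ⟨c, h1, h2⟩ => ⟨c, h2, h1⟩⟩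

-- ===== VERDICT (by name: the statement is the Claim_ definition above) =====
theorem determine_severe_illness_transplant_status_py_spec : Claim_equal_determine_severe_illness_transplant_status_py := by
  intro cl _
  unfold Spec_determine_severe_illness_transplant_status_py
  unfold determine_severe_illness_transplant_status_py determine_severe_illness_transplant_status_py_alt
  rw [pvAltLoop_eq, pv_any_swap pvSevereCodes cl, pv_any_swap pvTransplantCodes cl]
  simp
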